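-- pv_equiv track=rewrite | github.com/Unidata/awips2 | edexOsgi/build.edex/esb/data/utility/edex_static/base/textproducts/templates/product/Hazard_RFW_MultiPil.py | _headlineNumbers
-- ===== SOURCE A (Python) =====
-- def _headlineNumbers(idList):
--     numList = []
--     ### get rid of the state ids (NVZ, CAZ) in idlist
--     for i in range (len(idList)):
--         numList.append(idList[i].replace(idList[i][:3], ''))
--     ### sort for increasing order
--     numList.sort()
--     ### initialize the zone number list
--     if len(numList) > 1:
--         numStr = "FOR FIRE WEATHER ZONES "
--     else:
--         numStr = "FOR FIRE WEATHER ZONE "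
--
--     i = 0
--     for i in range (len(numList)):
--         if (len(numList) - i) == 1: ### one entry or last entry in list
--             return numStr + numList[i]
--         elif (len(numList) - i) > 2: ### more than three zones, and/or last zone in list
--             numStr = numStr + numList[i] + "..."
--         elif (len(numList) - i) > 1: ### next to last zone in list
--             numStr = numStr + numList[i] + " AND "
--
--     return numStr
-- ===== SOURCE B (Python) =====
-- def _headlineNumbers(idList):
--     nums = sorted(x.replace(x[:3], '') for x in idList)
--     prefix = "FOR FIRE WEATHER ZONES " if len(nums) > 1 else "FOR FIRE WEATHER ZONE "
--     if not nums:
--         return prefix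
--     # build the zone string back-to-front: start from the last number and
--     # prepend each earlier number with " AND " for the first prepend, "..." after
--     out = nums[-1]
--     for j, x in enumerate(reversed(nums[:-1])):
--         out = x + (" AND " if j == 0 else "...") + out
--     return prefix + out
-- ===== Notes on version B (the rewrite author's own statement) =====
-- stated objective: alternative
-- what changed: Replaces A's forward index-counting loop (which computes the separator from len(numList)-i and early-returns on the last entry) with a back-to-front construction: start from the last number and prepend each earlier one over the reversed remainder, using ' AND ' for the first prepend and '...' afterwards.
import Mathlib
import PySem

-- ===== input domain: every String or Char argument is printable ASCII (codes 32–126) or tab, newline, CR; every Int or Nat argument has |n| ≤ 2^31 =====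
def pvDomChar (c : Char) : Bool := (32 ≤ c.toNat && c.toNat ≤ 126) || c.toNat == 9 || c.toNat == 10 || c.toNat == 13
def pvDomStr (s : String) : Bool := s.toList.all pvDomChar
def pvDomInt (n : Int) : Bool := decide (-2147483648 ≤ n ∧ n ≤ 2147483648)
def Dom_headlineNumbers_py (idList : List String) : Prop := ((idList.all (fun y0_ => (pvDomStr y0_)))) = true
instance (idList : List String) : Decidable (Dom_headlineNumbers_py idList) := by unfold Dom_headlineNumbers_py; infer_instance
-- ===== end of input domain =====

-- B replaces A's forward index-counting separator loop (with its early return) by a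
-- back-to-front construction prepending over the reversed remainder; return values proven equal.

-- ===== PORT A =====
-- the stripped, sorted zone-number list (shared preprocessing of both Pythons)
def pvNums (idList : List String) : List String :=
  PySem.List.sorted
    (idList.map (fun x => PySem.Str.replace x (PySem.Str.slice x none (some 3)) ""))
    (fun s => s) false

-- A's second for-loop: the distance-to-end tests 'len - i == 1 / > 2 / > 1' become
-- tests on the remaining suffix (rest = [] / rest.length > 1 / otherwise)
def pvALoop : List String → String → String
  | [], numStr => numStr
  | x :: rest, numStr =>
    if rest.length = 0 then numStr ++ x                      -- (len - i) == 1 : return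
    else if rest.length > 1 then pvALoop rest (numStr ++ x ++ "...")   -- (len - i) > 2
    else pvALoop rest (numStr ++ x ++ " AND ")               -- (len - i) > 1

def headlineNumbers_py (idList : List String) : String :=
  let numList := pvNums idList
  let numStr := if numList.length > 1 then "FOR FIRE WEATHER ZONES " else "FOR FIRE WEATHER ZONE "
  pvALoop numList numStr

-- ===== PORT B =====
-- B's loop 'for j, x in enumerate(reversed(nums[:-1])): out = x + sep + out'
def pvBLoop : List String → Nat → String → String
  | [], _, out => out
  | x :: rest, j, out => pvBLoop rest (j + 1) (x ++ (if j = 0 then " AND " else "...") ++ out)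

def headlineNumbers_py_alt (idList : List String) : String :=
  let nums := pvNums idList
  let pfx := if nums.length > 1 then "FOR FIRE WEATHER ZONES " else "FOR FIRE WEATHER ZONE "
  match nums with
  | [] => pfx
  | n0 :: ns =>
      pfx ++ pvBLoop ((PySem.List.slice (n0 :: ns) none (some (-1))).reverse) 0
        ((n0 :: ns).getLast (by simp))

-- ===== PRECONDITION & SPEC =====
def Spec_headlineNumbers_py (idList : List String) (out : String) : Prop := out = headlineNumbers_py_alt idList
instance (idList : List String) (out : String) : Decidable (Spec_headlineNumbers_py idList out) := by unfold Spec_headlineNumbers_py; infer_instance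

-- ===== CLAIM (what is proved, stated in full; the proofs are below) =====
def Claim_equal_headlineNumbers_py : Prop := ∀ (idList : List String), Dom_headlineNumbers_py idList → Spec_headlineNumbers_py idList (headlineNumbers_py idList)

-- ===== LEMMAS AND PROOFS =====

-- pvBLoop after the first step: every further prepend uses "..."
def pvD : List String → String → String
  | [], out => out
  | a :: as, out => pvD as (a ++ "..." ++ out)

theorem pvBLoop_succ : ∀ (rs : List String) (j : Nat) (out : String),
    pvBLoop rs (j + 1) out = pvD rs out := by
  intro rs
  induction rs with
  | nil => intro j out; rfl
  | cons a as ih => intro j out; simp [pvBLoop, pvD, ih]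

theorem pvD_snoc : ∀ (as : List String) (a : String) (w : String),
    pvD (as ++ [a]) w = a ++ "..." ++ pvD as w := by
  intro as
  induction as with
  | nil => intro a w; rfl
  | cons b bs ih => intro a w; simp [pvD, ih]

theorem pvALoop_mid : ∀ (mid : List String) (y z p : String),
    pvALoop (mid ++ [y, z]) p = p ++ pvD mid.reverse (y ++ " AND " ++ z) := by
  intro mid
  induction mid with
  | nil =>
      intro y z p
      simp [pvALoop, pvD, String.append_assoc]
  | cons a mid' ih =>
      intro y z p
      have h1 : pvALoop ((a :: mid') ++ [y, z]) p = pvALoop (mid' ++ [y, z]) (p ++ a ++ "...") := by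
        simp [pvALoop]
      rw [h1, ih, List.reverse_cons, pvD_snoc]
      simp [String.append_assoc]

-- ===== VERDICT (by name: the statement is the Claim_ definition above) =====
theorem headlineNumbers_py_spec : Claim_equal_headlineNumbers_py := by
  intro idList _
  unfold Spec_headlineNumbers_py headlineNumbers_py headlineNumbers_py_alt
  cases h : pvNums idList with
  | nil => simp [pvALoop]
  | cons x rest =>
      cases rest with
      | nil => simp [pvALoop, PySem.List.slice_to_neg_one, pvBLoop]
      | cons y l =>
          simp only [PySem.List.slice_to_neg_one]
          have hdl : (x :: y :: l).dropLast.reverse ≠ [] := by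
            simp [List.dropLast]
          cases hr : (x :: y :: l).dropLast.reverse with
          | nil => exact absurd hr hdl
          | cons a as =>
              obtain ⟨z, hz⟩ : ∃ z, (x :: y :: l).getLast (by simp) = z := ⟨_, rfl⟩
              have hnums : (x :: y :: l) = as.reverse ++ [a, z] := by
                rw [← hz]
                have h1 : (x :: y :: l).dropLast = as.reverse ++ [a] := by
                  have := congrArg List.reverse hr
                  simpa using this
                have h2 : (x :: y :: l) = (x :: y :: l).dropLast ++ [(x :: y :: l).getLast (by simp)] :=
                  (List.dropLast_concat_getLast (by simp)).symm
                rw [h1] at h2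
                simpa [List.append_assoc] using h2
              rw [hz, hnums, pvALoop_mid]
              simp [pvBLoop, pvBLoop_succ]
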